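-- pv_equiv track=rewrite | github.com/RamananVr/Leetcodepython | hash_table_sorting/1555_Minimum_Distance_Between_Two_Points_With_the_Same_X_or_Y_Coordinate.py | min_manhattan_distance
-- ===== SOURCE A (Python) =====
-- from collections import defaultdict
--
-- def min_manhattan_distance(points):
--     """
--     Finds the minimum Manhattan distance between any two points with the same x-coordinate
--     or the same y-coordinate.
--
--     :param points: List[List[int]] - List of points on the X-Y plane
--     :return: int - Minimum Manhattan distance or -1 if no two points share the same x or y coordinate
--     """
--     # Dictionaries to store points grouped by x and y coordinates
--     x_map = defaultdict(list)
--     y_map = defaultdict(list)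
--
--     # Group points by their x and y coordinates
--     for x, y in points:
--         x_map[x].append(y)
--         y_map[y].append(x)
--
--     # Function to calculate the minimum distance for a given map
--     def calculate_min_distance(coord_map):
--         min_distance = float('inf')
--         for key in coord_map:
--             # Sort the points along the same coordinate
--             coord_map[key].sort()
--             # Calculate the minimum distance between consecutive points
--             for i in range(1, len(coord_map[key])):
--                 min_distance = min(min_distance, coord_map[key][i] - coord_map[key][i - 1])
--         return min_distance
--
--     # Calculate the minimum distance for x and y coordinates
--     min_x_distance = calculate_min_distance(x_map)
--     min_y_distance = calculate_min_distance(y_map)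
--
--     # Get the overall minimum distance
--     result = min(min_x_distance, min_y_distance)
--
--     # If no valid distance was found, return -1
--     return result if result != float('inf') else -1
-- ===== SOURCE B (Python) =====
-- def min_manhattan_distance(points):
--     """
--     Minimum Manhattan distance between any two points sharing an x- or y-coordinate,
--     or -1 if no such pair exists. Single pairwise scan, no grouping structures.
--     """
--     best = None
--     pts = [(x, y) for x, y in points]
--     for i, (x, y) in enumerate(pts):
--         for (x2, y2) in pts[i + 1:]:
--             if x == x2:
--                 d = abs(y - y2)
--                 if best is None or d < best:
--                     best = d
--             if y == y2:
--                 d = abs(x - x2)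
--                 if best is None or d < best:
--                     best = d
--     return -1 if best is None else best
-- ===== Notes on version B (the rewrite author's own statement) =====
-- stated objective: simpler
-- what changed: Replaces the two defaultdict groupings plus per-key sorting and consecutive-difference scans with one direct scan over all unordered pairs of points, taking |dy| when the pair shares x and |dx| when it shares y; no dictionaries and no sorting.
import Mathlib
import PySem

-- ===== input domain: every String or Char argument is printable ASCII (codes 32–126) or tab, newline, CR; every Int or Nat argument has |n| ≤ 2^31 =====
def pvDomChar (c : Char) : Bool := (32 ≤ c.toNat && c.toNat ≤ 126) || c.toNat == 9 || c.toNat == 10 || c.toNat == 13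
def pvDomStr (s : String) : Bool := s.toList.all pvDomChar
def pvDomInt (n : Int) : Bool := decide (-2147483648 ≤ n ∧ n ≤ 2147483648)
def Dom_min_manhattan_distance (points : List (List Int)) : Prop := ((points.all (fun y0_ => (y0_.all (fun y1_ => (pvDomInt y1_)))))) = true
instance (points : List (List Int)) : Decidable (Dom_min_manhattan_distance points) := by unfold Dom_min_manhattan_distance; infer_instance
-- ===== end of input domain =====

-- B replaces A's two defaultdict groupings + per-key sorts + consecutive scans by one direct
-- scan over all unordered pairs of points (no dictionaries, no sorting); same return value.
-- (A sorts its dict values in place; neither program mutates the caller's `points`.)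

-- ===== PORT A =====

-- min(m, v) threading Python's float('inf') sentinel as `none`
def omin (b : Option Int) (v : Int) : Option Int :=
  match b with
  | none => some v
  | some m => some (min m v)

-- min(mx, my) where either side may still be the inf sentinel
def omerge (a b : Option Int) : Option Int :=
  match a, b with
  | none, b => b
  | a, none => a
  | some x, some y => some (min x y)

-- `x_map[x].append(y)` on a defaultdict(list); a point that is not `[x, y]` is unreachable
-- under Pre_ (Python raises on unpacking there)
def aStepX (d : PySem.Dict Int (List Int)) (p : List Int) : PySem.Dict Int (List Int) :=
  match p with
  | [x, y] => d.modify x [] (· ++ [y])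
  | _ => d

def aStepY (d : PySem.Dict Int (List Int)) (p : List Int) : PySem.Dict Int (List Int) :=
  match p with
  | [x, y] => d.modify y [] (· ++ [x])
  | _ => d

-- calculate_min_distance: `for key in coord_map:` sorts coord_map[key] in place, then scans
-- consecutive entries (each key is visited once, so reading the sorted copy is exact)
def aCalc (d : PySem.Dict Int (List Int)) : Option Int :=
  d.keys.foldl (fun md k =>
    let s := PySem.List.sorted (d.getD k []) (fun v => v) false
    (PySem.List.pyRange 1 (s.length : Int) 1).foldl
      (fun a i => omin a (PySem.List.pyGetD s i 0 - PySem.List.pyGetD s (i - 1) 0)) md) none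

def min_manhattan_distance (points : List (List Int)) : Int :=
  let maps := points.foldl (fun s p => (aStepX s.1 p, aStepY s.2 p))
      ((PySem.Dict.empty : PySem.Dict Int (List Int)), (PySem.Dict.empty : PySem.Dict Int (List Int)))
  match omerge (aCalc maps.1) (aCalc maps.2) with
  | some v => v
  | none => -1

-- ===== PORT B =====

-- `if best is None or d < best: best = d`
def bUpd (b : Option Int) (d : Int) : Option Int :=
  match b with
  | none => some d
  | some m => if d < m then some d else some m

-- the inner loop `for (x2, y2) in pts[i+1:]`
def bInner (x y : Int) (rest : List (Int × Int)) (best : Option Int) : Option Int :=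
  rest.foldl (fun b q =>
    let b1 := if x = q.1 then bUpd b |y - q.2| else b
    if y = q.2 then bUpd b1 |x - q.1| else b1) best

-- the outer loop: each point against the points after it
def bLoop : List (Int × Int) → Option Int → Option Int
  | [], best => best
  | q :: t, best => bLoop t (bInner q.1 q.2 t best)

-- `(p[0], p[1])`; indices in range under Pre_
def toPt (p : List Int) : Int × Int := (PySem.List.pyGetD p 0 0, PySem.List.pyGetD p 1 0)

def min_manhattan_distance_alt (points : List (List Int)) : Int :=
  match bLoop (points.map toPt) none with
  | some v => v
  | none => -1

-- ===== PRECONDITION & SPEC =====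
-- Pre_ excludes only inputs on which A raises: `for x, y in points` raises ValueError
-- unless every point has exactly two coordinates.
def Pre_min_manhattan_distance (points : List (List Int)) : Prop :=
  ∀ p ∈ points, p.length = 2
instance (points : List (List Int)) : Decidable (Pre_min_manhattan_distance points) := by
  unfold Pre_min_manhattan_distance; infer_instance

def pvWitness_min_manhattan_distance : List (List Int) := [[0, 0], [0, 3], [5, 3]]

def Spec_min_manhattan_distance (points : List (List Int)) (out : Int) : Prop := out = min_manhattan_distance_alt points
instance (points : List (List Int)) (out : Int) : Decidable (Spec_min_manhattan_distance points out) := by unfold Spec_min_manhattan_distance; infer_instance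

-- ===== CLAIM (what is proved, stated in full; the proofs are below) =====
def Claim_equal_min_manhattan_distance : Prop := ∀ (points : List (List Int)), Dom_min_manhattan_distance points → Pre_min_manhattan_distance points → Spec_min_manhattan_distance points (min_manhattan_distance points)

-- ===== LEMMAS AND PROOFS =====

-- minimum of a list of candidates, `none` = no candidate yet
def M (l : List Int) : Option Int := l.foldl omin none

-- differences of consecutive elements
def adjDiffs : List Int → List Int
  | a :: b :: t => (b - a) :: adjDiffs (b :: t)
  | _ => []

-- |a - b| over all unordered pairs, first element minus later ones
def pairAbs : List Int → List Int
  | [] => []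
  | a :: t => t.map (fun b => |a - b|) ++ pairAbs t

-- all |Δy| over pairs of points sharing their first coordinate
def sameX : List (Int × Int) → List Int
  | [] => []
  | q :: t => (t.filter (fun r => r.1 == q.1)).map (fun r => |q.2 - r.2|) ++ sameX t

def sw (q : Int × Int) : Int × Int := (q.2, q.1)

-- the y-values grouped under first coordinate c (A's x_map entry at c)
def ys (pts : List (Int × Int)) (c : Int) : List Int :=
  (pts.filter (fun p => p.1 == c)).map (·.2)

-- merge of per-key minima over a key list
def bigMerge (l : List Int) (F : Int → Option Int) : Option Int :=
  l.foldl (fun md k => omerge md (F k)) none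

-- ---- omin / omerge algebra ----

lemma omin_eq_omerge (b : Option Int) (v : Int) : omin b v = omerge b (some v) := by
  cases b <;> rfl

lemma bUpd_eq_omin (b : Option Int) (v : Int) : bUpd b v = omin b v := by
  cases b with
  | none => rfl
  | some m => simp only [bUpd, omin]; split <;> simp <;> omega

lemma omerge_none_left (b : Option Int) : omerge none b = b := rfl

lemma omerge_none_right (b : Option Int) : omerge b none = b := by cases b <;> rfl

lemma omerge_comm (a b : Option Int) : omerge a b = omerge b a := by
  cases a <;> cases b <;> simp [omerge, min_comm]

lemma omerge_assoc (a b c : Option Int) : omerge (omerge a b) c = omerge a (omerge b c) := by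
  cases a <;> cases b <;> cases c <;> simp [omerge, min_assoc]

lemma omerge_left_comm (a b c : Option Int) : omerge a (omerge b c) = omerge b (omerge a c) := by
  rw [← omerge_assoc, omerge_comm a b, omerge_assoc]

lemma foldl_omin_eq (l : List Int) : ∀ b : Option Int, l.foldl omin b = omerge b (M l) := by
  induction l with
  | nil => intro b; cases b <;> rfl
  | cons a t ih =>
      intro b
      rw [show (a :: t).foldl omin b = t.foldl omin (omin b a) from rfl, ih,
        show M (a :: t) = t.foldl omin (some a) from rfl, ih,
        show omin b a = omerge b (some a) from omin_eq_omerge b a, omerge_assoc]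

lemma M_cons (a : Int) (l : List Int) : M (a :: l) = omerge (some a) (M l) := by
  rw [show M (a :: l) = l.foldl omin (some a) from rfl, foldl_omin_eq]

lemma M_append (l₁ l₂ : List Int) : M (l₁ ++ l₂) = omerge (M l₁) (M l₂) := by
  simp only [M, List.foldl_append]
  rw [foldl_omin_eq]
  rfl

lemma foldl_omerge_eq (l : List Int) (F : Int → Option Int) :
    ∀ b : Option Int, l.foldl (fun md k => omerge md (F k)) b = omerge b (bigMerge l F) := by
  induction l with
  | nil => intro b; cases b <;> rfl
  | cons a t ih =>
      intro b
      rw [show (a :: t).foldl (fun md k => omerge md (F k)) b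
            = t.foldl (fun md k => omerge md (F k)) (omerge b (F a)) from rfl, ih,
        show bigMerge (a :: t) F = t.foldl (fun md k => omerge md (F k)) (omerge none (F a)) from rfl,
        ih, omerge_none_left, omerge_assoc]

lemma bigMerge_cons (a : Int) (l : List Int) (F : Int → Option Int) :
    bigMerge (a :: l) F = omerge (F a) (bigMerge l F) := by
  rw [show bigMerge (a :: l) F
        = l.foldl (fun md k => omerge md (F k)) (omerge none (F a)) from rfl,
    foldl_omerge_eq, omerge_none_left]

-- ---- permutation invariance ----

lemma omin_swap (b : Option Int) (x y : Int) : omin (omin b x) y = omin (omin b y) x := by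
  cases b <;> simp [omin, min_assoc, min_comm x y]

lemma foldl_omin_perm {l l' : List Int} (h : l.Perm l') :
    ∀ b : Option Int, l.foldl omin b = l'.foldl omin b := by
  induction h with
  | nil => intro b; rfl
  | cons x _ ih => intro b; simp only [List.foldl_cons]; exact ih _
  | swap x y l => intro b; simp only [List.foldl_cons]; rw [omin_swap]
  | trans _ _ ih1 ih2 => intro b; rw [ih1, ih2]

lemma M_perm {l l' : List Int} (h : l.Perm l') : M l = M l' := foldl_omin_perm h none

lemma omerge_swap (b : Option Int) (x y : Option Int) :
    omerge (omerge b x) y = omerge (omerge b y) x := by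
  rw [omerge_assoc, omerge_assoc, omerge_comm x y]

lemma bigMerge_perm {l l' : List Int} (h : l.Perm l') (F : Int → Option Int) :
    bigMerge l F = bigMerge l' F := by
  suffices H : ∀ b : Option Int, l.foldl (fun md k => omerge md (F k)) b
      = l'.foldl (fun md k => omerge md (F k)) b from H none
  induction h with
  | nil => intro b; rfl
  | cons x _ ih => intro b; simp only [List.foldl_cons]; exact ih _
  | swap x y l => intro b; simp only [List.foldl_cons]; rw [omerge_swap]
  | trans _ _ ih1 ih2 => intro b; rw [ih1, ih2]

lemma pairAbs_perm {l l' : List Int} (h : l.Perm l') : (pairAbs l).Perm (pairAbs l') := by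
  induction h with
  | nil => exact List.Perm.refl _
  | cons x h ih => exact (h.map _).append ih
  | swap x y l =>
      simp only [pairAbs, List.map_cons, List.cons_append]
      rw [abs_sub_comm y x]
      exact (List.Perm.cons _ (List.perm_append_comm_assoc _ _ _))
  | trans _ _ ih1 ih2 => exact ih1.trans ih2

-- ---- the index scan is the consecutive-differences scan ----

lemma scan_shift (a : Int) (u : List Int) (b : Option Int) :
    (PySem.List.pyRange 2 ((u.length : Int) + 1) 1).foldl
      (fun acc i => omin acc (PySem.List.pyGetD (a :: u) i 0 - PySem.List.pyGetD (a :: u) (i - 1) 0)) b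
    = (PySem.List.pyRange 1 (u.length : Int) 1).foldl
      (fun acc i => omin acc (PySem.List.pyGetD u i 0 - PySem.List.pyGetD u (i - 1) 0)) b := by
  rw [PySem.List.pyRange_one, PySem.List.pyRange_one]
  have h2 : ((u.length : Int) + 1 - 2).toNat = ((u.length : Int) - 1).toNat := by omega
  rw [h2, List.foldl_map, List.foldl_map]
  congr 1
  funext acc k
  have e1 : (2 : Int) + (k : Int) = ((k + 2 : Nat) : Int) := by omega
  have e2 : (2 : Int) + (k : Int) - 1 = ((k + 1 : Nat) : Int) := by omega
  have e3 : (1 : Int) + (k : Int) = ((k + 1 : Nat) : Int) := by omega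
  have e4 : (1 : Int) + (k : Int) - 1 = ((k : Nat) : Int) := by omega
  rw [e2, e1, e4, e3, PySem.List.pyGetD_natCast, PySem.List.pyGetD_natCast,
    PySem.List.pyGetD_natCast, PySem.List.pyGetD_natCast]
  simp [List.getD]

lemma scanAdj (s : List Int) : ∀ b : Option Int,
    (PySem.List.pyRange 1 (s.length : Int) 1).foldl
      (fun a i => omin a (PySem.List.pyGetD s i 0 - PySem.List.pyGetD s (i - 1) 0)) b
    = (adjDiffs s).foldl omin b := by
  induction s with
  | nil =>
      intro b
      rw [PySem.List.pyRange_one_eq_nil (by simp)]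
      rfl
  | cons a t ih =>
      intro b
      cases t with
      | nil =>
          rw [PySem.List.pyRange_one_eq_nil (by simp)]
          rfl
      | cons c t2 =>
          have hlen : (1 : Int) < ((a :: c :: t2).length : Int) := by push_cast [List.length_cons]; omega
          rw [PySem.List.pyRange_one_cons hlen]
          simp only [List.foldl_cons]
          have hget1 : PySem.List.pyGetD (a :: c :: t2) 1 0 = c := by
            have : (1 : Int) = ((1 : Nat) : Int) := rfl
            rw [this, PySem.List.pyGetD_natCast]
            simp [List.getD]
          have hget0 : PySem.List.pyGetD (a :: c :: t2) (1 - 1) 0 = a := by norm_num [PySem.List.pyGetD_zero_cons]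
          rw [hget1, hget0]
          have hl : ((a :: c :: t2).length : Int) = ((c :: t2).length : Int) + 1 := by simp
          have h12 : (1 : Int) + 1 = 2 := by norm_num
          rw [hl, h12, scan_shift a (c :: t2) (omin b (c - a)), ih]
          simp only [adjDiffs, List.foldl_cons]

-- ---- B's loops compute M over the pair candidates ----

lemma bInner_eq (x y : Int) : ∀ (t : List (Int × Int)) (b : Option Int),
    bInner x y t b
    = omerge b (omerge (M ((t.filter (fun r => r.1 == x)).map (fun r => |y - r.2|)))
                       (M ((t.filter (fun r => r.2 == y)).map (fun r => |x - r.1|)))) := by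
  intro t
  induction t with
  | nil => intro b; simp [bInner, M, omerge_none_right]
  | cons q t ih =>
      intro b
      have step : bInner x y (q :: t) b = bInner x y t
          (if y = q.2 then bUpd (if x = q.1 then bUpd b |y - q.2| else b) |x - q.1|
           else (if x = q.1 then bUpd b |y - q.2| else b)) := rfl
      rw [step, ih]
      by_cases h1 : x = q.1 <;> by_cases h2 : y = q.2
      · simp only [if_pos h1, if_pos h2, List.filter_cons,
          show (q.1 == x) = true by simp [h1.symm],
          show (q.2 == y) = true by simp [h2.symm], if_pos, List.map_cons, M_cons,
          bUpd_eq_omin, omin_eq_omerge]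
        simp [omerge_assoc, omerge_comm, omerge_left_comm]
      · simp only [if_pos h1, if_neg h2, List.filter_cons,
          show (q.1 == x) = true by simp [h1.symm],
          show (q.2 == y) = false by simp [Ne.symm h2], if_pos,
          List.map_cons, M_cons, bUpd_eq_omin, omin_eq_omerge, Bool.false_eq_true]
        simp [omerge_assoc, omerge_comm, omerge_left_comm]
      · simp only [if_neg h1, if_pos h2, List.filter_cons,
          show (q.1 == x) = false by simp [Ne.symm h1],
          show (q.2 == y) = true by simp [h2.symm], if_pos,
          List.map_cons, M_cons, bUpd_eq_omin, omin_eq_omerge, Bool.false_eq_true]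
        simp [omerge_assoc, omerge_comm]
      · simp only [if_neg h1, if_neg h2, List.filter_cons,
          show (q.1 == x) = false by simp [Ne.symm h1],
          show (q.2 == y) = false by simp [Ne.symm h2], Bool.false_eq_true]
        simp [omerge_comm]

lemma bLoop_eq : ∀ (pts : List (Int × Int)) (b : Option Int),
    bLoop pts b = omerge b (omerge (M (sameX pts)) (M (sameX (pts.map sw)))) := by
  intro pts
  induction pts with
  | nil => intro b; simp [bLoop, sameX, M, omerge_none_right]
  | cons q t ih =>
      intro b
      simp only [bLoop]
      rw [ih, bInner_eq]
      have hy : ((t.map sw).filter (fun r => r.1 == q.2)).map (fun r => |q.1 - r.2|)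
          = (t.filter (fun r => r.2 == q.2)).map (fun r => |q.1 - r.1|) := by
        rw [List.filter_map, List.map_map]; rfl
      simp only [List.map_cons, sameX, sw, M_append, hy]
      simp [omerge_assoc, omerge_comm, omerge_left_comm]

-- ---- grouping: M over same-x pair candidates = merge over per-key pair candidates ----

lemma ys_cons (q : Int × Int) (t : List (Int × Int)) (c : Int) :
    ys (q :: t) c = if q.1 = c then q.2 :: ys t c else ys t c := by
  simp only [ys, List.filter_cons]
  split <;> simp_all

lemma M_pairAbs_cons (a : Int) (g : List Int) :
    M (pairAbs (a :: g)) = omerge (M (g.map (fun b => |a - b|))) (M (pairAbs g)) := by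
  simp only [pairAbs, M_append]

lemma bigMerge_congr {l : List Int} {F G : Int → Option Int} (h : ∀ k ∈ l, F k = G k) :
    bigMerge l F = bigMerge l G := by
  unfold bigMerge
  exact PySem.List.foldl_congr_mem l _ _ none (fun _ k hk => by rw [h k hk])

lemma bigMerge_split (xs : List Int) (c : Int) (F : Int → Option Int) (hF : c ∉ xs → F c = none) :
    bigMerge (PySem.Set.ofList xs) F
      = omerge (F c) (bigMerge ((PySem.Set.ofList xs).filter (fun k => k != c)) F) := by
  by_cases hq : c ∈ xs
  · have hperm : (PySem.Set.ofList xs).Perm (c :: (PySem.Set.ofList xs).filter (fun k => k != c)) := by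
      rw [List.perm_ext_iff_of_nodup (PySem.Set.nodup_ofList _)
        (List.nodup_cons.mpr ⟨by simp, (PySem.Set.nodup_ofList _).filter _⟩)]
      intro k
      simp only [List.mem_cons, List.mem_filter, PySem.Set.mem_ofList, bne_iff_ne]
      by_cases hk : k = c
      · subst hk; tauto
      · tauto
    rw [bigMerge_perm hperm F, bigMerge_cons]
  · have hfe : (PySem.Set.ofList xs).filter (fun k => k != c) = PySem.Set.ofList xs := by
      apply List.filter_eq_self.mpr
      intro a ha
      have : a ∈ xs := (PySem.Set.mem_ofList _ _).mp ha
      simp only [bne_iff_ne]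
      exact fun e => hq (e ▸ this)
    rw [hfe, hF hq, omerge_none_left]

lemma Mgroup : ∀ pts : List (Int × Int),
    M (sameX pts) = bigMerge (PySem.Set.ofList (pts.map (·.1))) (fun k => M (pairAbs (ys pts k))) := by
  intro pts
  induction pts with
  | nil => simp [sameX, ys, M, bigMerge, PySem.Set.ofList]
  | cons q t ih =>
      simp only [sameX, List.map_cons]
      rw [M_append, ih]
      set xs := t.map (·.1) with hxs
      set F : Int → Option Int := fun k => M (pairAbs (ys t k)) with hFdef
      set F' : Int → Option Int := fun k => M (pairAbs (ys (q :: t) k)) with hF'def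
      have hzero : q.1 ∉ xs → F q.1 = none := by
        intro h
        have hnil : ys t q.1 = [] := by
          simp only [ys, List.map_eq_nil_iff, List.filter_eq_nil_iff, beq_iff_eq]
          intro r hr e
          exact h (by rw [hxs]; exact List.mem_map.mpr ⟨r, hr, e⟩)
        simp [hFdef, hnil, pairAbs, M]
      have hperm1 : (PySem.Set.ofList (q.1 :: xs)).Perm
          (q.1 :: (PySem.Set.ofList xs).filter (fun k => k != q.1)) := by
        rw [List.perm_ext_iff_of_nodup (PySem.Set.nodup_ofList _)
          (List.nodup_cons.mpr ⟨by simp, (PySem.Set.nodup_ofList _).filter _⟩)]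
        intro k
        simp only [List.mem_cons, List.mem_filter, PySem.Set.mem_ofList, bne_iff_ne]
        by_cases hk : k = q.1
        · subst hk; tauto
        · tauto
      have hcongr : bigMerge ((PySem.Set.ofList xs).filter (fun k => k != q.1)) F'
          = bigMerge ((PySem.Set.ofList xs).filter (fun k => k != q.1)) F := by
        apply bigMerge_congr
        intro k hk
        have hne : q.1 ≠ k := by
          have := (List.mem_filter.mp hk).2
          simp only [bne_iff_ne] at this
          exact Ne.symm this
        simp only [hF'def, hFdef, ys_cons, if_neg hne]
      have hF'c : F' q.1 = omerge (M ((ys t q.1).map (fun b => |q.2 - b|))) (F q.1) := by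
        simp [hF'def, hFdef, ys_cons, M_pairAbs_cons]
      have hmap : (t.filter (fun r => r.1 == q.1)).map (fun r => |q.2 - r.2|)
          = (ys t q.1).map (fun b => |q.2 - b|) := by
        simp [ys, List.map_map]
      rw [bigMerge_perm hperm1 F', bigMerge_cons, hF'c, hcongr, omerge_assoc,
        ← bigMerge_split xs q.1 F hzero, hmap]

-- ---- sorted consecutive differences have the same minimum as all pair distances ----

lemma M_const_min (x : Int) : ∀ l : List Int, (∀ y ∈ l, x ≤ y) → l.foldl omin (some x) = some x := by
  intro l
  induction l with
  | nil => intro _; rfl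
  | cons a t ih =>
      intro h
      simp only [List.foldl_cons, omin]
      have : min x a = x := min_eq_left (h a (by simp))
      rw [this]
      exact ih (fun y hy => h y (by simp [hy]))

lemma M_adj_sorted : ∀ l : List Int, l.Pairwise (· ≤ ·) → M (adjDiffs l) = M (pairAbs l) := by
  intro l
  induction l with
  | nil => intro _; rfl
  | cons a t ih =>
      intro hp
      cases t with
      | nil => rfl
      | cons h t2 =>
          have hpt : (h :: t2).Pairwise (· ≤ ·) := hp.of_cons
          have hah : a ≤ h := (List.pairwise_cons.mp hp).1 h (by simp)
          have hat : ∀ y ∈ h :: t2, a ≤ y := (List.pairwise_cons.mp hp).1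
          have hht : ∀ y ∈ t2, h ≤ y := (List.pairwise_cons.mp hpt).1
          rw [M_pairAbs_cons]
          have hmap : M ((h :: t2).map (fun b => |a - b|)) = some (h - a) := by
            simp only [List.map_cons, M, List.foldl_cons]
            have : omin none |a - h| = some (h - a) := by
              simp [omin, abs_sub_comm a h, abs_of_nonneg (by omega : (0:Int) ≤ h - a)]
            rw [this]
            apply M_const_min
            intro y hy
            obtain ⟨c, hc, rfl⟩ := List.mem_map.mp hy
            have h1 : h ≤ c := hht c hc
            have h2 : a ≤ c := le_trans hah h1
            rw [abs_sub_comm, abs_of_nonneg (by omega : (0:Int) ≤ c - a)]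
            omega
          rw [hmap, ← ih hpt]
          simp only [adjDiffs]
          rw [M_cons]

lemma M_sorted_eq_pairAbs (l : List Int) :
    M (adjDiffs (PySem.List.sorted l (fun v => v) false)) = M (pairAbs l) := by
  rw [M_adj_sorted _ (by simpa using PySem.List.sorted_pairwise l (fun v => v))]
  exact M_perm (pairAbs_perm (PySem.List.sorted_perm l (fun v => v) false))

-- ---- A's calculate_min_distance ----

lemma aCalc_eq (d : PySem.Dict Int (List Int)) :
    aCalc d = bigMerge d.keys
      (fun k => M (adjDiffs (PySem.List.sorted (d.getD k []) (fun v => v) false))) := by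
  unfold aCalc bigMerge
  congr 1
  funext md k
  rw [scanAdj, foldl_omin_eq]

-- ---- assembling both programs ----

lemma toPt_pair (x y : Int) : toPt [x, y] = (x, y) := by
  have h1 : (1 : Int) = ((1 : Nat) : Int) := rfl
  simp only [toPt, PySem.List.pyGetD_zero_cons, h1, PySem.List.pyGetD_natCast]
  rfl

lemma points_shape {points : List (List Int)} (hpre : Pre_min_manhattan_distance points) :
    ∀ p ∈ points, ∃ x y, p = [x, y] := by
  intro p hp
  have h2 := hpre p hp
  cases p with
  | nil => simp at h2
  | cons x r =>
      cases r with
      | nil => simp at h2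
      | cons y r2 =>
          cases r2 with
          | nil => exact ⟨x, y, rfl⟩
          | cons z r3 => simp at h2

lemma foldA_X (points : List (List Int)) (hpre : Pre_min_manhattan_distance points)
    (d : PySem.Dict Int (List Int)) :
    points.foldl aStepX d
      = (points.map toPt).foldl (fun d p => d.modify p.1 [] (fun x => x ++ [p.2])) d := by
  rw [List.foldl_map]
  apply PySem.List.foldl_congr_mem
  intro d p hp
  obtain ⟨x, y, rfl⟩ := points_shape hpre p hp
  rw [toPt_pair]
  rfl

lemma foldA_Y (points : List (List Int)) (hpre : Pre_min_manhattan_distance points)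
    (d : PySem.Dict Int (List Int)) :
    points.foldl aStepY d
      = ((points.map toPt).map sw).foldl (fun d p => d.modify p.1 [] (fun x => x ++ [p.2])) d := by
  rw [List.foldl_map, List.foldl_map]
  apply PySem.List.foldl_congr_mem
  intro d p hp
  obtain ⟨x, y, rfl⟩ := points_shape hpre p hp
  rw [toPt_pair]
  rfl

lemma aSide (pts : List (Int × Int)) :
    aCalc (pts.foldl (fun d p => d.modify p.1 [] (fun x => x ++ [p.2])) PySem.Dict.empty)
      = M (sameX pts) := by
  rw [aCalc_eq]
  have hkeys : (pts.foldl (fun d p => d.modify p.1 [] (fun x => x ++ [p.2]))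
      (PySem.Dict.empty : PySem.Dict Int (List Int))).keys
      = PySem.Set.ofList (pts.map (·.1)) := by
    rw [PySem.Dict.keys_foldl_modify_key pts (fun p => p.1) [] (fun _ p => fun x => x ++ [p.2])]
    simp [PySem.Set.update_nil_left]
  rw [hkeys, Mgroup]
  apply bigMerge_congr
  intro k _
  have hgd : (pts.foldl (fun d p => d.modify p.1 [] (fun x => x ++ [p.2]))
      (PySem.Dict.empty : PySem.Dict Int (List Int))).getD k [] = ys pts k := by
    rw [PySem.Dict.getD_foldl_modify_append]
    simp [ys]
  rw [hgd, M_sorted_eq_pairAbs]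

-- ===== VERDICT (by name: the statement is the Claim_ definition above) =====
theorem min_manhattan_distance_spec : Claim_equal_min_manhattan_distance := by
  intro points _ hpre
  unfold Spec_min_manhattan_distance
  simp only [min_manhattan_distance, min_manhattan_distance_alt, PySem.List.foldl_prod_mk]
  rw [foldA_X points hpre PySem.Dict.empty, foldA_Y points hpre PySem.Dict.empty,
    aSide, aSide, bLoop_eq, omerge_none_left]
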